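-- pv_equiv track=rewrite | github.com/lazy-top/ros2_dds_gui | managers/service_manager.py | parse_service_definition
-- ===== SOURCE A (Python) =====
-- from typing import List, Dict, Optional, Any
--
-- def parse_service_definition(definition: str) -> Dict:
--     """解析服务定义，提取请求和响应字段
--
--     Args:
--         definition: 服务定义文本
--
--     Returns:
--         Dict: 包含 request_fields 和 response_fields 的字典
--     """
--     result = {
--         'request_fields': [],
--         'response_fields': []
--     }
--
--     if not definition:
--         return result
--
--     lines = definition.split('\n')
--     current_section = 'request'
--
--     for line in lines:
--         line = line.strip()
--
--         # 分隔符表示响应部分开始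
--         if line.startswith('---'):
--             current_section = 'response'
--             continue
--
--         # 跳过空行和注释
--         if not line or line.startswith('#'):
--             continue
--
--         # 解析字段定义（格式：type field_name）
--         parts = line.split()
--         if len(parts) >= 2:
--             field_info = {
--                 'type': parts[0],
--                 'name': parts[1],
--                 'default': parts[2] if len(parts) > 2 else None
--             }
--
--             if current_section == 'request':
--                 result['request_fields'].append(field_info)
--             else:
--                 result['response_fields'].append(field_info)
--
--     return result
-- ===== SOURCE B (Python) =====
-- def _field(line):
--     """Return the field dict for a stripped line, or None if it is not a field."""
--     if line.startswith('#') or line.startswith('---'):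
--         return None
--     parts = line.split()
--     if len(parts) < 2:
--         return None
--     return {
--         'type': parts[0],
--         'name': parts[1],
--         'default': parts[2] if len(parts) > 2 else None,
--     }
--
--
-- def _split_at_separator(lines):
--     """Split at the first '---' line: (lines before it, lines after it)."""
--     for i, line in enumerate(lines):
--         if line.startswith('---'):
--             return lines[:i], lines[i + 1:]
--     return lines, []
--
--
-- def parse_service_definition(definition: str) -> dict:
--     if not definition:
--         return {'request_fields': [], 'response_fields': []}
--     stripped = [line.strip() for line in definition.split('\n')]
--     request_lines, response_lines = _split_at_separator(stripped)
--     return {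
--         'request_fields': [f for f in map(_field, request_lines) if f is not None],
--         'response_fields': [f for f in map(_field, response_lines) if f is not None],
--     }
-- ===== Notes on version B (the rewrite author's own statement) =====
-- stated objective: simpler
-- what changed: Replaces the single stateful loop carrying a current_section flag by a pure decomposition: partition the stripped lines at the first separator line, then map one line-to-field helper (a filterMap) over each group.
import Mathlib
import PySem

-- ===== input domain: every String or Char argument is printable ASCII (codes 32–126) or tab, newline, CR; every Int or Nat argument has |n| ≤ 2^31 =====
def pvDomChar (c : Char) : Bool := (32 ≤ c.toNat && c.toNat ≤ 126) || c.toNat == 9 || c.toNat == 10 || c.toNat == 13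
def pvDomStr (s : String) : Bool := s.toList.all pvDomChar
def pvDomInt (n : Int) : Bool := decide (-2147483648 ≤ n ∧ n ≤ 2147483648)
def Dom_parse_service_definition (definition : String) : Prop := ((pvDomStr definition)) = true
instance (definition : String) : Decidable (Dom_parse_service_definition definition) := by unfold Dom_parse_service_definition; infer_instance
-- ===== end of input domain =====

-- B replaces A's single stateful loop (current_section flag) by partitioning the stripped
-- lines at the first separator line and mapping a line->field helper over each group (simpler).

-- ===== PORT A =====
-- one step of A's for-loop; state = (current_section, request_fields, response_fields)
def pvStepA (st : String × List (List (String × Option String)) × List (List (String × Option String)))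
    (line : String) :
    String × List (List (String × Option String)) × List (List (String × Option String)) :=
  let line := PySem.Str.strip line
  if PySem.Str.startswith line "---" then ("response", st.2.1, st.2.2)
  else if line = "" || PySem.Str.startswith line "#" then st
  else match PySem.Str.split₀ line with
    | p0 :: p1 :: rest =>
        let fi : List (String × Option String) :=
          [("type", some p0), ("name", some p1), ("default", rest.head?)]
        if st.1 = "request" then (st.1, st.2.1 ++ [fi], st.2.2)
        else (st.1, st.2.1, st.2.2 ++ [fi])
    | _ => st

def parse_service_definition (definition : String) : List (String × List (List (String × Option String))) :=
  if definition = "" then [("request_fields", []), ("response_fields", [])]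
  else
    let lines := (PySem.Str.split? definition "\n").getD []
    let st := lines.foldl pvStepA ("request", [], [])
    [("request_fields", st.2.1), ("response_fields", st.2.2)]

-- ===== PORT B =====
-- _field: the field dict for a stripped line, or none
def pvField? (line : String) : Option (List (String × Option String)) :=
  if PySem.Str.startswith line "#" || PySem.Str.startswith line "---" then none
  else match PySem.Str.split₀ line with
    | p0 :: p1 :: rest => some [("type", some p0), ("name", some p1), ("default", rest.head?)]
    | _ => none

-- _split_at_separator: lines before the first '---' line, lines after it
def pvSplitSep : List String → List String × List String
  | [] => ([], [])
  | l :: ls =>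
      if PySem.Str.startswith l "---" then ([], ls)
      else
        let p := pvSplitSep ls
        (l :: p.1, p.2)

def parse_service_definition_alt (definition : String) : List (String × List (List (String × Option String))) :=
  if definition = "" then [("request_fields", []), ("response_fields", [])]
  else
    let stripped := ((PySem.Str.split? definition "\n").getD []).map PySem.Str.strip
    let p := pvSplitSep stripped
    [("request_fields", p.1.filterMap pvField?), ("response_fields", p.2.filterMap pvField?)]

-- ===== PRECONDITION & SPEC =====
def Spec_parse_service_definition (definition : String) (out : List (String × List (List (String × Option String)))) : Prop := out = parse_service_definition_alt definition
instance (definition : String) (out : List (String × List (List (String × Option String)))) : Decidable (Spec_parse_service_definition definition out) := by unfold Spec_parse_service_definition; infer_instance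

-- ===== CLAIM (what is proved, stated in full; the proofs are below) =====
def Claim_equal_parse_service_definition : Prop := ∀ (definition : String), Dom_parse_service_definition definition → Spec_parse_service_definition definition (parse_service_definition definition)

-- ===== LEMMAS AND PROOFS =====

-- after the separator, A's loop stays in 'response' and appends exactly the fields
theorem pvLoop_resp (ls : List String)
    (req res : List (List (String × Option String))) :
    ls.foldl pvStepA ("response", req, res)
      = ("response", req, res ++ (ls.map PySem.Str.strip).filterMap pvField?) := by
  induction ls generalizing res with
  | nil => simp
  | cons l ls ih =>
    simp only [List.foldl_cons, List.map_cons, List.filterMap_cons]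
    by_cases hsep : PySem.Chars.startswith (PySem.Chars.strip l.toList) ['-', '-', '-'] = true
    · have hst : pvStepA ("response", req, res) l = ("response", req, res) := by
        simp [pvStepA, hsep]
      have hf : pvField? (PySem.Str.strip l) = none := by simp [pvField?, hsep]
      rw [hst, ih, hf]
    · by_cases h1 : PySem.Chars.startswith (PySem.Chars.strip l.toList) ['#'] = true
      · have hst : pvStepA ("response", req, res) l = ("response", req, res) := by
          simp [pvStepA, hsep, h1]
        have hf : pvField? (PySem.Str.strip l) = none := by simp [pvField?, h1]
        rw [hst, ih, hf]
      · by_cases h0 : PySem.Str.strip l = ""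
        · have hst : pvStepA ("response", req, res) l = ("response", req, res) := by
            simp [pvStepA, h0]
          have hf : pvField? (PySem.Str.strip l) = none := by rw [h0]; decide
          rw [hst, ih, hf]
        · match hm : PySem.Str.split₀ (PySem.Str.strip l) with
          | p0 :: p1 :: rest =>
            have hst : pvStepA ("response", req, res) l
                = ("response", req, res ++ [[("type", some p0), ("name", some p1), ("default", rest.head?)]]) := by
              simp [pvStepA, hsep, h1, h0, hm]
            have hf : pvField? (PySem.Str.strip l)
                = some [("type", some p0), ("name", some p1), ("default", rest.head?)] := by
              simp [pvField?, hsep, h1, hm]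
            rw [hst, ih, hf]
            simp
          | [] =>
            have hst : pvStepA ("response", req, res) l = ("response", req, res) := by
              simp [pvStepA, hsep, h1, h0, hm]
            have hf : pvField? (PySem.Str.strip l) = none := by
              simp [pvField?, hsep, h1, hm]
            rw [hst, ih, hf]
          | [p0] =>
            have hst : pvStepA ("response", req, res) l = ("response", req, res) := by
              simp [pvStepA, hsep, h1, h0, hm]
            have hf : pvField? (PySem.Str.strip l) = none := by
              simp [pvField?, hsep, h1, hm]
            rw [hst, ih, hf]

-- before the separator, A's loop in 'request' computes B's two filterMaps over the split groups
theorem pvLoop_req (ls : List String)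
    (req res : List (List (String × Option String))) :
    (ls.foldl pvStepA ("request", req, res)).2
      = (req ++ (pvSplitSep (ls.map PySem.Str.strip)).1.filterMap pvField?,
         res ++ (pvSplitSep (ls.map PySem.Str.strip)).2.filterMap pvField?) := by
  induction ls generalizing req with
  | nil => simp [pvSplitSep]
  | cons l ls ih =>
    simp only [List.foldl_cons, List.map_cons]
    by_cases hsep : PySem.Chars.startswith (PySem.Chars.strip l.toList) ['-', '-', '-'] = true
    · have hst : pvStepA ("request", req, res) l = ("response", req, res) := by
        simp [pvStepA, hsep]
      have hsp : pvSplitSep (PySem.Str.strip l :: ls.map PySem.Str.strip)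
          = ([], ls.map PySem.Str.strip) := by simp [pvSplitSep, hsep]
      rw [hst, pvLoop_resp, hsp]
      simp
    · have hsp : pvSplitSep (PySem.Str.strip l :: ls.map PySem.Str.strip)
          = (PySem.Str.strip l :: (pvSplitSep (ls.map PySem.Str.strip)).1,
             (pvSplitSep (ls.map PySem.Str.strip)).2) := by simp [pvSplitSep, hsep]
      by_cases h1 : PySem.Chars.startswith (PySem.Chars.strip l.toList) ['#'] = true
      · have hst : pvStepA ("request", req, res) l = ("request", req, res) := by
          simp [pvStepA, hsep, h1]
        have hf : pvField? (PySem.Str.strip l) = none := by simp [pvField?, h1]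
        rw [hst, ih, hsp]
        simp [hf]
      · by_cases h0 : PySem.Str.strip l = ""
        · have hst : pvStepA ("request", req, res) l = ("request", req, res) := by
            simp [pvStepA, h0]
            decide
          have hf : pvField? (PySem.Str.strip l) = none := by rw [h0]; decide
          rw [hst, ih, hsp]
          simp [hf]
        · match hm : PySem.Str.split₀ (PySem.Str.strip l) with
          | p0 :: p1 :: rest =>
            have hst : pvStepA ("request", req, res) l
                = ("request", req ++ [[("type", some p0), ("name", some p1), ("default", rest.head?)]], res) := by
              simp [pvStepA, hsep, h1, h0, hm]
            have hf : pvField? (PySem.Str.strip l)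
                = some [("type", some p0), ("name", some p1), ("default", rest.head?)] := by
              simp [pvField?, hsep, h1, hm]
            rw [hst, ih, hsp]
            simp [hf]
          | [] =>
            have hst : pvStepA ("request", req, res) l = ("request", req, res) := by
              simp [pvStepA, hsep, h1, h0, hm]
            have hf : pvField? (PySem.Str.strip l) = none := by
              simp [pvField?, hsep, h1, hm]
            rw [hst, ih, hsp]
            simp [hf]
          | [p0] =>
            have hst : pvStepA ("request", req, res) l = ("request", req, res) := by
              simp [pvStepA, hsep, h1, h0, hm]
            have hf : pvField? (PySem.Str.strip l) = none := by
              simp [pvField?, hsep, h1, hm]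
            rw [hst, ih, hsp]
            simp [hf]

-- ===== VERDICT (by name: the statement is the Claim_ definition above) =====
theorem parse_service_definition_spec : Claim_equal_parse_service_definition := by
  intro definition _
  unfold Spec_parse_service_definition parse_service_definition parse_service_definition_alt
  by_cases h : definition = ""
  · simp [h]
  · have h2 := pvLoop_req ((PySem.Str.split? definition "\n").getD []) [] []
    simp [h, h2]
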